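-- pv_equiv track=rewrite | github.com/dibiasej/py_op | py_op/utils/date_utils.py | find_bracketing_dtes
-- ===== SOURCE A (Python) =====
-- def find_bracketing_dtes(dte_list, target_dte):
--     """
--     This function returs the closes two dtes between target_dte, we pass in dte_list and a target_dte for ex 30 and it returns the two closes ex (28, 34)
--     Returns (dte_lo, dte_hi) where:
--       - if exact match exists: (target_dte, None)
--       - else: (nearest below, nearest above)
--       - if target outside range: (nearest end, None)  [you can choose to return (None, None) instead]
--     Assumes dte_list is sorted ascending.
--     """
--     if not dte_list:
--         return None, None
--
--     # exact match
--     if target_dte in dte_list: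
--         return target_dte, None
--
--     # outside range -> clamp to nearest available
--     if target_dte < dte_list[0]:
--         return dte_list[0], None
--     if target_dte > dte_list[-1]:
--         return dte_list[-1], None
--
--     # bracket inside range
--     for lo, hi in zip(dte_list[:-1], dte_list[1:]):
--         if lo < target_dte < hi:
--             return lo, hi
--
--     return None, None
-- ===== SOURCE B (Python) =====
-- def find_bracketing_dtes(dte_list, target_dte):
--     """Single left-to-right pass: one loop maintains found/first/last/first-bracketing-pair
--     instead of A's separate membership test, end lookups and zip over two slice copies."""
--     found = False
--     first = None
--     last = None
--     bracket = None
--     prev = None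
--     for x in dte_list:
--         if first is None:
--             first = x
--         if x == target_dte:
--             found = True
--         if bracket is None and prev is not None and prev < target_dte < x:
--             bracket = (prev, x)
--         prev = x
--         last = x
--     if first is None:
--         return None, None
--     if found:
--         return target_dte, None
--     if target_dte < first:
--         return first, None
--     if target_dte > last:
--         return last, None
--     if bracket is not None:
--         return bracket
--     return None, None
-- ===== Notes on version B (the rewrite author's own statement) =====
-- stated objective: alternative
-- what changed: B fuses A's four separate traversals (membership test, first/last end comparisons, and the zip scan over two slice copies) into a single left-to-right pass that maintains found/first/last/first-bracketing-pair accumulators, then decides from those.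
import Mathlib
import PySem

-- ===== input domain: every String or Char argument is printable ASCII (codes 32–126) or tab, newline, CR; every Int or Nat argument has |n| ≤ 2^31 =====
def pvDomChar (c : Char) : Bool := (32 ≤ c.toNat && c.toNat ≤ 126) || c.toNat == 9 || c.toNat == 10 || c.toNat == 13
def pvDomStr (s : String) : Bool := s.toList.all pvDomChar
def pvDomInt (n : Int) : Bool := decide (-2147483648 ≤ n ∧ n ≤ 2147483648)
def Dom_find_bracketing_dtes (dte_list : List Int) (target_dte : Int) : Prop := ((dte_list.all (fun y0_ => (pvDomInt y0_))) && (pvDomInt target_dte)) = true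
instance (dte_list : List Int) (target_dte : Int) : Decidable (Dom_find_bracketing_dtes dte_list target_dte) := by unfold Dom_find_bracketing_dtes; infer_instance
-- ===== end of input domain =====

-- B fuses A's four traversals into one pass with accumulators; same value on every list (total, no Pre_).

-- ===== PORT A =====
-- A's for-loop over zip(dte_list[:-1], dte_list[1:]) with early return
def findBracketA (target : Int) : List (Int × Int) → Option (Int × Int)
  | [] => none
  | (lo, hi) :: rest =>
    if lo < target ∧ target < hi then some (lo, hi) else findBracketA target rest

def find_bracketing_dtes (dte_list : List Int) (target_dte : Int) : Option Int × Option Int :=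
  match dte_list with
  | [] => (none, none)
  | x :: xs =>
    if (x :: xs).contains target_dte then (some target_dte, none)
    else if target_dte < x then (some x, none)
    else if target_dte > (x :: xs).getLast (by simp) then (some ((x :: xs).getLast (by simp)), none)
    else
      match findBracketA target_dte (List.zip ((x :: xs).dropLast) ((x :: xs).tail)) with
      | some (lo, hi) => (some lo, some hi)
      | none => (none, none)

-- ===== PORT B =====
-- one loop iteration of Source B: state = (found, first, last, bracket, prev)
def stepB (t : Int) (s : Bool × Option Int × Option Int × Option (Int × Int) × Option Int)
    (x : Int) : Bool × Option Int × Option Int × Option (Int × Int) × Option Int :=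
  match s with
  | (found, first, _last, bracket, prev) =>
    let first := match first with | none => some x | some v => some v
    let found := found || (x == t)
    let bracket :=
      match bracket, prev with
      | none, some p => if p < t ∧ t < x then some (p, x) else none
      | b, _ => b
    (found, first, some x, bracket, some x)

def find_bracketing_dtes_alt (dte_list : List Int) (target_dte : Int) : Option Int × Option Int :=
  match dte_list.foldl (stepB target_dte) (false, none, none, none, none) with
  | (found, first, last, bracket, _prev) =>
    match first with
    | none => (none, none)
    | some fi =>
      if found then (some target_dte, none)
      else if target_dte < fi then (some fi, none)
      else
        match last with
        | none => (none, none)  -- unreachable: last is set whenever first is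
        | some la =>
          if target_dte > la then (some la, none)
          else
            match bracket with
            | some (lo, hi) => (some lo, some hi)
            | none => (none, none)

-- ===== PRECONDITION & SPEC =====
def Spec_find_bracketing_dtes (dte_list : List Int) (target_dte : Int) (out : Option Int × Option Int) : Prop := out = find_bracketing_dtes_alt dte_list target_dte
instance (dte_list : List Int) (target_dte : Int) (out : Option Int × Option Int) : Decidable (Spec_find_bracketing_dtes dte_list target_dte out) := by unfold Spec_find_bracketing_dtes; infer_instance

-- ===== CLAIM (what is proved, stated in full; the proofs are below) =====
def Claim_equal_find_bracketing_dtes : Prop := ∀ (dte_list : List Int) (target_dte : Int), Dom_find_bracketing_dtes dte_list target_dte → Spec_find_bracketing_dtes dte_list target_dte (find_bracketing_dtes dte_list target_dte)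

-- ===== LEMMAS AND PROOFS =====

-- Source B's bracket scan expressed as a recursion on the remaining list, carrying prev
def scanBr (t : Int) : Option Int → List Int → Option (Int × Int)
  | _, [] => none
  | some p, x :: xs => if p < t ∧ t < x then some (p, x) else scanBr t (some x) xs
  | none, x :: xs => scanBr t (some x) xs

theorem getLast?_or_cons (x : Int) (xs : List Int) :
    Option.or xs.getLast? (some x) = (x :: xs).getLast? := by
  cases xs with
  | nil => simp
  | cons y ys => simp [List.getLast?_cons]

theorem foldB_spec (t : Int) (l : List Int) :
    ∀ (f : Bool) (fi la : Option Int) (br : Option (Int × Int)) (pr : Option Int),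
    l.foldl (stepB t) (f, fi, la, br, pr) =
      (f || l.contains t, Option.or fi l.head?, Option.or l.getLast? la,
       Option.or br (scanBr t pr l), Option.or l.getLast? pr) := by
  induction l with
  | nil => intro f fi la br pr; simp [scanBr]
  | cons x xs ih =>
    intro f fi la br pr
    have hstep : stepB t (f, fi, la, br, pr) x =
        (f || (x == t), Option.or fi (some x), some x,
         Option.or br (match pr with
           | some p => if p < t ∧ t < x then some (p, x) else none
           | none => none), some x) := by
      cases fi <;> cases pr <;> cases br <;> simp [stepB, Option.or]
    rw [List.foldl_cons, hstep, ih]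
    refine congrArg₂ _ ?_ (congrArg₂ _ ?_ (congrArg₂ _ ?_ (congrArg₂ _ ?_ ?_)))
    · rw [show (x == t) = decide (t = x) from by rcases eq_or_ne x t with h|h <;> simp [h, Ne.symm]]
      simp [Bool.or_assoc]
    · cases fi <;> simp [Option.or]
    · exact getLast?_or_cons x xs
    · rw [Option.or_assoc]
      congr 1
      cases pr with
      | none => simp [scanBr, Option.or]
      | some p =>
        by_cases h : p < t ∧ t < x <;> simp [scanBr, h, Option.or]
    · exact getLast?_or_cons x xs

theorem scanBr_some (t : Int) (l : List Int) :
    ∀ p : Int, scanBr t (some p) l =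
      findBracketA t (List.zip (p :: l).dropLast (p :: l).tail) := by
  induction l with
  | nil => intro p; simp [scanBr, findBracketA]
  | cons x xs ih =>
    intro p
    by_cases h : p < t ∧ t < x <;>
      simp [scanBr, h, List.dropLast_cons_of_ne_nil, findBracketA, ih x]

theorem scanBr_none (t : Int) (l : List Int) :
    scanBr t none l = findBracketA t (List.zip l.dropLast l.tail) := by
  cases l with
  | nil => simp [scanBr, findBracketA]
  | cons x xs => simpa [scanBr] using scanBr_some t xs x

-- ===== VERDICT (by name: the statement is the Claim_ definition above) =====
theorem find_bracketing_dtes_spec : Claim_equal_find_bracketing_dtes := by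
  intro l t _
  unfold Spec_find_bracketing_dtes
  cases l with
  | nil => rfl
  | cons x xs =>
    rw [find_bracketing_dtes_alt, foldB_spec]
    simp only [Option.or, List.head?_cons, scanBr_none]
    have hlast : (x :: xs).getLast? = some ((x :: xs).getLast (by simp)) := by
      simp [List.getLast?_eq_some_getLast]
    rw [hlast]
    simp only [find_bracketing_dtes]
    by_cases h1 : (x :: xs).contains t
    · rfl
    · simp only [h1, Bool.false_eq_true, if_false]
      by_cases h2 : t < x
      · simp [h2]
      · simp only [h2, if_false]
        by_cases h3 : t > (x :: xs).getLast (by simp)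
        · simp [h3]
        · simp only [h3, if_false]
          rfl
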